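-- pv_equiv track=rewrite | github.com/kalyan14333/Potato-disease-classifier | data_manager.py | _get_city_suggestions
-- ===== SOURCE A (Python) =====
-- def _get_city_suggestions(city):
--     """Get possible city name suggestions"""
--     suggestions = []
--     if len(city) > 3:
--         suggestions.append(f"Try: {city.title()}")
--         suggestions.append("Check for typos in the city name")
--         suggestions.append("Use the city's official English name")
--         suggestions.append("Try nearby larger cities")
--
--         # Common city name variations for Indian cities
--         indian_cities = {
--             "Chennai": ["Madras"],
--             "Mumbai": ["Bombay"],
--             "Kolkata": ["Calcutta"],
--             "Bengaluru": ["Bangalore"],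
--             "Pune": ["Poona"]
--         }
--
--         for official_name, variants in indian_cities.items():
--             if city.lower() in [v.lower() for v in variants]:
--                 suggestions.append(f"Try the official name: {official_name}")
--                 break
--
--     return suggestions
-- ===== SOURCE B (Python) =====
-- _OFFICIAL_BY_VARIANT = {
--     "madras": "Chennai",
--     "bombay": "Mumbai",
--     "calcutta": "Kolkata",
--     "bangalore": "Bengaluru",
--     "poona": "Pune",
-- }
--
--
-- def _get_city_suggestions(city):
--     """Get possible city name suggestions"""
--     if len(city) <= 3:
--         return []
--     suggestions = [
--         f"Try: {city.title()}",
--         "Check for typos in the city name",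
--         "Use the city's official English name",
--         "Try nearby larger cities",
--     ]
--     official = _OFFICIAL_BY_VARIANT.get(city.lower())
--     if official is not None:
--         suggestions.append(f"Try the official name: {official}")
--     return suggestions
-- ===== Notes on version B (the rewrite author's own statement) =====
-- stated objective: idiomatic
-- what changed: Replaced the official->variants dict plus a for-loop with per-iteration lowercased comprehensions and a break by a single precomputed reverse index from lowercased variant to official name, so the lookup is one dict.get with no loop.
import Mathlib
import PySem

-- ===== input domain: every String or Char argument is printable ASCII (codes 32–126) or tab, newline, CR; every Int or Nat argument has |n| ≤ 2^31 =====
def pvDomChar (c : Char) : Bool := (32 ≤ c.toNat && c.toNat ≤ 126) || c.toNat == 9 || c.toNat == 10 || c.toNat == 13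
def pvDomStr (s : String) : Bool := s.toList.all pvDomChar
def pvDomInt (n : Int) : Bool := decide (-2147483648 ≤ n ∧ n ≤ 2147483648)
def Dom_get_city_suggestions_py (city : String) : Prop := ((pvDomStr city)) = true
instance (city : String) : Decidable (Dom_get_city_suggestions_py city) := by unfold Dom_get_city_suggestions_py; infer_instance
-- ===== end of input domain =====

-- B replaces A's official->variants table and its scan loop by one reverse index (lowercased variant -> official) queried with a single dict lookup; return value only, no side effects.

-- str.title(), exact on ASCII: a letter is uppercased after a non-cased character, lowercased otherwise
def pvTitleChars : List Char → Bool → List Char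
  | [], _ => []
  | c :: cs, prevAlpha =>
    (if PySem.Str.isalpha c then
       (if prevAlpha then PySem.Chars.lowerChar c else PySem.Chars.upperChar c)
     else c) :: pvTitleChars cs (PySem.Str.isalpha c)

def pvTitle (s : String) : String := String.ofList (pvTitleChars s.toList false)

-- ===== PORT A =====
-- A's table: official name -> list of variants
def pvIndianCities : List (String × List String) :=
  [("Chennai", ["Madras"]), ("Mumbai", ["Bombay"]), ("Kolkata", ["Calcutta"]),
   ("Bengaluru", ["Bangalore"]), ("Pune", ["Poona"])]

-- the for-loop with break: first matching official name appends its suggestion, then stop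
def pvLoopA (city : String) : List (String × List String) → List String → List String
  | [], sugg => sugg
  | (official, variants) :: rest, sugg =>
    if PySem.Str.lower city ∈ variants.map PySem.Str.lower then
      sugg ++ ["Try the official name: " ++ official]
    else pvLoopA city rest sugg

def get_city_suggestions_py (city : String) : List String :=
  let suggestions : List String := []
  if PySem.Str.len city > 3 then
    let suggestions := suggestions ++
      ["Try: " ++ pvTitle city,
       "Check for typos in the city name",
       "Use the city's official English name",
       "Try nearby larger cities"]
    pvLoopA city pvIndianCities suggestions
  else suggestions

-- ===== PORT B =====
-- B's reverse index: lowercased variant -> official name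
def pvOfficialByVariant : PySem.Dict String String :=
  PySem.Dict.ofList
    [("madras", "Chennai"), ("bombay", "Mumbai"), ("calcutta", "Kolkata"),
     ("bangalore", "Bengaluru"), ("poona", "Pune")]

def get_city_suggestions_py_alt (city : String) : List String :=
  if PySem.Str.len city ≤ 3 then []
  else
    let suggestions : List String :=
      ["Try: " ++ pvTitle city,
       "Check for typos in the city name",
       "Use the city's official English name",
       "Try nearby larger cities"]
    match pvOfficialByVariant.get? (PySem.Str.lower city) with
    | some official => suggestions ++ ["Try the official name: " ++ official]
    | none => suggestions

-- ===== PRECONDITION & SPEC =====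
def Spec_get_city_suggestions_py (city : String) (out : List String) : Prop := out = get_city_suggestions_py_alt city
instance (city : String) (out : List String) : Decidable (Spec_get_city_suggestions_py city out) := by unfold Spec_get_city_suggestions_py; infer_instance

-- ===== CLAIM (what is proved, stated in full; the proofs are below) =====
def Claim_equal_get_city_suggestions_py : Prop := ∀ (city : String), Dom_get_city_suggestions_py city → Spec_get_city_suggestions_py city (get_city_suggestions_py city)

-- ===== LEMMAS AND PROOFS =====
-- the A-loop over the fixed table agrees with B's reverse-index lookup, for any lowered name
theorem pvLoopA_eq_lookup (city : String) (sugg : List String) :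
    pvLoopA city pvIndianCities sugg =
      (match pvOfficialByVariant.get? (PySem.Str.lower city) with
       | some official => sugg ++ ["Try the official name: " ++ official]
       | none => sugg) := by
  have e1 : PySem.Str.lower "Madras" = "madras" := by decide
  have e2 : PySem.Str.lower "Bombay" = "bombay" := by decide
  have e3 : PySem.Str.lower "Calcutta" = "calcutta" := by decide
  have e4 : PySem.Str.lower "Bangalore" = "bangalore" := by decide
  have e5 : PySem.Str.lower "Poona" = "poona" := by decide
  have hD : pvOfficialByVariant = PySem.Dict.mk
      [("madras", "Chennai"), ("bombay", "Mumbai"), ("calcutta", "Kolkata"),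
       ("bangalore", "Bengaluru"), ("poona", "Pune")] := by decide
  by_cases h1 : PySem.Str.lower city = "madras"
  · simp [pvLoopA, pvIndianCities, e1, e2, e3, e4, e5, h1, hD, PySem.Dict.get?_mk_cons, beq_iff_eq]
  · by_cases h2 : PySem.Str.lower city = "bombay"
    · simp [pvLoopA, pvIndianCities, e1, e2, e3, e4, e5, h2, hD, PySem.Dict.get?_mk_cons, beq_iff_eq]
    · by_cases h3 : PySem.Str.lower city = "calcutta"
      · simp [pvLoopA, pvIndianCities, e1, e2, e3, e4, e5, h3, hD, PySem.Dict.get?_mk_cons, beq_iff_eq]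
      · by_cases h4 : PySem.Str.lower city = "bangalore"
        · simp [pvLoopA, pvIndianCities, e1, e2, e3, e4, e5, h4, hD, PySem.Dict.get?_mk_cons, beq_iff_eq]
        · by_cases h5 : PySem.Str.lower city = "poona"
          · simp [pvLoopA, pvIndianCities, e1, e2, e3, e4, e5, h5, hD, PySem.Dict.get?_mk_cons, beq_iff_eq]
          · simp [pvLoopA, pvIndianCities, e1, e2, e3, e4, e5, h1, h2, h3, h4, h5,
                  Ne.symm h1, Ne.symm h2, Ne.symm h3, Ne.symm h4, Ne.symm h5,
                  hD, PySem.Dict.get?_mk_cons, PySem.Dict.get?, beq_iff_eq]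

-- ===== VERDICT (by name: the statement is the Claim_ definition above) =====
theorem get_city_suggestions_py_spec : Claim_equal_get_city_suggestions_py := by
  intro city _
  unfold Spec_get_city_suggestions_py get_city_suggestions_py get_city_suggestions_py_alt
  by_cases h : PySem.Str.len city > 3
  · rw [if_pos h, if_neg (by omega : ¬ PySem.Str.len city ≤ 3)]
    exact pvLoopA_eq_lookup city _
  · rw [if_neg h, if_pos (by omega : PySem.Str.len city ≤ 3)]
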